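-- pv_equiv track=rewrite | github.com/ssorry123/ProblemSolving | 프로그래머스월간코드챌린지시즌1/11_3.py | check_star
-- ===== SOURCE A (Python) =====
-- def check_star(val, arr):
--     # val이 위치한 idx를 찾는다
--     idx_list = [-1]
--     for idx in range(len(arr)):
--         if arr[idx] == val:
--             idx_list.append(idx)
--     idx_list.append(len(arr))
--
--
--     # 각 idx 사이의 간격을 구한다
--     interval = []
--     for idx in range(1, len(idx_list)):
--         interval.append(idx_list[idx] - idx_list[idx-1] - 1)
--
--
--     # interval에 있는 것을 하나씩 가져가보자
--     ret = 0
--     for i in range(len(interval) - 1):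
--         # 일단 왼쪽에서 가져갈 수 있으면 가져간다
--         if interval[i]>0:
--             interval[i]-=1
--             ret += 1
--
--         # 왼쪽에서 가져갈 수 없으면, 오른쪽에서 가져간다
--         elif interval[i+1]>0:
--             interval[i+1]-=1
--             ret += 1
--
--         # 오른쪽에서도 가져갈 수 없으면
--         # 포기하고 뒤로 가서 만들자
--         else:
--             pass
--
--     return ret
-- ===== SOURCE B (Python) =====
-- def check_star(val, arr):
--     # Single pass over arr: track the gap carried into the pending occurrence
--     # of val (cur) and the run length since it (run); apply the same greedy
--     # left-then-right borrowing without building index/interval lists.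
--     ret = 0
--     cur = None
--     run = 0
--     for x in arr:
--         if x == val:
--             if cur is None:
--                 cur = run
--             elif cur > 0:
--                 ret += 1
--                 cur = run
--             elif run > 0:
--                 ret += 1
--                 cur = run - 1
--             else:
--                 cur = run
--             run = 0
--         else:
--             run += 1
--     if cur is not None and (cur > 0 or run > 0):
--         ret += 1
--     return ret
-- ===== Notes on version B (the rewrite author's own statement) =====
-- stated objective: alternative
-- what changed: Replaces A's three sequential passes (building an index list, then an interval list, then a greedy loop that mutates the interval list in place) by a single pass over arr that tracks only the carried gap before the pending occurrence and the current run length, applying the same left-then-right greedy borrowing on the fly; it trades A's intermediate lists for constant extra state at the same O(n) cost.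
import Mathlib
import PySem

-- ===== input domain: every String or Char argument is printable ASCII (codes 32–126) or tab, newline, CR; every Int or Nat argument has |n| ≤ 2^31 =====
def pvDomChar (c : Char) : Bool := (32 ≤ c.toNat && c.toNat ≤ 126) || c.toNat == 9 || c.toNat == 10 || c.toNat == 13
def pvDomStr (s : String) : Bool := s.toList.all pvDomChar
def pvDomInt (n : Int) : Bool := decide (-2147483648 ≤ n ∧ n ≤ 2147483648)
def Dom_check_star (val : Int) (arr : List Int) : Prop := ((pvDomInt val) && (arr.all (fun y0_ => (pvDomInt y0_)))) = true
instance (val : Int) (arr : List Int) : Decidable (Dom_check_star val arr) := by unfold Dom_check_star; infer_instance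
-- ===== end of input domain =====

-- B replaces A's three passes (index list, interval list, greedy loop with in-place
-- decrements) by one pass over arr maintaining only the carried gap and the current run length.

-- ===== PORT A =====
-- indices in this port are always in range (0 ≤ idx < length), so pyGetD _ _ 0 is exact for Python's xs[idx]
def check_star (val : Int) (arr : List Int) : Int :=
  let idx_list := (PySem.List.pyRange 0 (arr.length : Int) 1).foldl
    (fun acc idx => if PySem.List.pyGetD arr idx 0 = val then acc ++ [idx] else acc) [(-1 : Int)]
  let idx_list := idx_list ++ [(arr.length : Int)]
  let interval := (PySem.List.pyRange 1 (idx_list.length : Int) 1).foldl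
    (fun acc idx => acc ++ [PySem.List.pyGetD idx_list idx 0 - PySem.List.pyGetD idx_list (idx - 1) 0 - 1]) []
  let p := (PySem.List.pyRange 0 ((interval.length : Int) - 1) 1).foldl
    (fun (st : List Int × Int) i =>
      if PySem.List.pyGetD st.1 i 0 > 0 then
        (st.1.set i.toNat (PySem.List.pyGetD st.1 i 0 - 1), st.2 + 1)
      else if PySem.List.pyGetD st.1 (i + 1) 0 > 0 then
        (st.1.set (i + 1).toNat (PySem.List.pyGetD st.1 (i + 1) 0 - 1), st.2 + 1)
      else st) (interval, 0)
  p.2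

-- ===== PORT B =====
def check_star_alt (val : Int) (arr : List Int) : Int :=
  let st := arr.foldl
    (fun (st : Int × Option Int × Int) x =>
      if x = val then
        match st.2.1 with
        | none => (st.1, some st.2.2, 0)
        | some c =>
          if c > 0 then (st.1 + 1, some st.2.2, 0)
          else if st.2.2 > 0 then (st.1 + 1, some (st.2.2 - 1), 0)
          else (st.1, some st.2.2, 0)
      else (st.1, st.2.1, st.2.2 + 1)) (0, none, 0)
  match st.2.1 with
  | some c => if c > 0 ∨ st.2.2 > 0 then st.1 + 1 else st.1
  | none => st.1

-- ===== PRECONDITION & SPEC =====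
def Spec_check_star (val : Int) (arr : List Int) (out : Int) : Prop := out = check_star_alt val arr
instance (val : Int) (arr : List Int) (out : Int) : Decidable (Spec_check_star val arr out) := by unfold Spec_check_star; infer_instance

-- ===== CLAIM (what is proved, stated in full; the proofs are below) =====
def Claim_equal_check_star : Prop := ∀ (val : Int) (arr : List Int), Dom_check_star val arr → Spec_check_star val arr (check_star val arr)

-- ===== LEMMAS AND PROOFS =====

def posL (val : Int) : List Int → List Int
  | [] => []
  | x :: t => if x = val then 0 :: (posL val t).map (· + 1) else (posL val t).map (· + 1)

theorem posL_eq (val : Int) (arr : List Int) :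
    (PySem.List.pyRange 0 (arr.length : Int) 1).filter
      (fun i => PySem.List.pyGetD arr i 0 = val) = posL val arr := by
  induction arr with
  | nil => simp [posL, PySem.List.pyRange_one_eq_nil]
  | cons x t ih =>
    rw [PySem.List.pyRange_zero_nat] at *
    simp only [List.length_cons]
    rw [List.range_succ_eq_map]
    simp only [List.map_cons, List.map_map, List.filter_cons]
    have hmap : ∀ p : Int → Bool,
        List.filter p (List.map ((fun k : Nat => (↑k : Int)) ∘ Nat.succ) (List.range t.length))
        = List.map ((fun k : Nat => (↑k : Int)) ∘ Nat.succ)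
            (List.filter (fun k => p ((↑k : Int) + 1)) (List.range t.length)) := by
      intro p
      rw [List.filter_map]
      have hpe : (p ∘ (fun k : Nat => (↑k : Int)) ∘ Nat.succ) = (fun k : Nat => p ((↑k : Int) + 1)) := by
        funext k; simp [Function.comp]
      rw [hpe]
    have hget : ∀ k : Nat, PySem.List.pyGetD (x :: t) ((↑k : Int) + 1) 0 = PySem.List.pyGetD t (↑k) 0 := by
      intro k
      have : ((↑k : Int) + 1) = ((k + 1 : Nat) : Int) := by push_cast; ring
      rw [this, PySem.List.pyGetD_natCast, PySem.List.pyGetD_natCast]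
      rfl
    rw [hmap]
    simp only [hget]
    have hfe : (List.filter (fun k : Nat => decide (PySem.List.pyGetD t (↑k) 0 = val)) (List.range t.length))
        = List.filter ((fun i : Int => decide (PySem.List.pyGetD t i 0 = val)) ∘ (fun k : Nat => (↑k : Int))) (List.range t.length) := rfl
    have ih' : List.map (fun k : Nat => (↑k : Int))
        (List.filter ((fun i : Int => decide (PySem.List.pyGetD t i 0 = val)) ∘ (fun k : Nat => (↑k : Int))) (List.range t.length)) = posL val t := by
      rw [← List.filter_map]; exact ih
    have hcomp : List.map ((fun k : Nat => (↑k : Int)) ∘ Nat.succ)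
        (List.filter ((fun i : Int => decide (PySem.List.pyGetD t i 0 = val)) ∘ (fun k : Nat => (↑k : Int))) (List.range t.length))
        = (posL val t).map (· + 1) := by
      rw [← ih', List.map_map]
      have hce : ((fun k : Nat => (↑k : Int)) ∘ Nat.succ) = ((fun x : Int => x + 1) ∘ (fun k : Nat => (↑k : Int))) := by
        funext k; simp [Function.comp]
      rw [hce]
    rw [hfe, hcomp]
    have h0 : PySem.List.pyGetD (x :: t) ((0 : Nat) : Int) 0 = x := by
      rw [PySem.List.pyGetD_natCast]; rfl
    by_cases hx : x = val <;> simp [posL, hx]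
def diffs : List Int → List Int
  | a :: b :: t => (b - a - 1) :: diffs (b :: t)
  | _ => []
termination_by l => l.length

theorem diffs_map_add_one : ∀ l : List Int, diffs (l.map (· + 1)) = diffs l
  | [] => by simp [diffs]
  | [a] => by simp [diffs]
  | a :: b :: t => by
    have ih := diffs_map_add_one (b :: t)
    simp only [List.map_cons] at *
    simp [diffs, ih]

theorem interval_map_eq_diffs : ∀ xs : List Int,
    (PySem.List.pyRange 1 (xs.length : Int) 1).map
      (fun idx => PySem.List.pyGetD xs idx 0 - PySem.List.pyGetD xs (idx - 1) 0 - 1) = diffs xs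
  | [] => by simp [diffs, PySem.List.pyRange_one_eq_nil]
  | [a] => by
    rw [PySem.List.pyRange_one_eq_nil (by simp)]
    simp [diffs]
  | a :: b :: t => by
    have ih := interval_map_eq_diffs (b :: t)
    have h1 : (1 : Int) < ((a :: b :: t).length : Int) := by simp
    rw [PySem.List.pyRange_one_cons h1]
    simp only [List.map_cons]
    have hh : PySem.List.pyGetD (a :: b :: t) 1 0 - PySem.List.pyGetD (a :: b :: t) (1 - 1) 0 - 1 = b - a - 1 := by
      norm_num [PySem.List.pyGetD_ofNat']
    have hlen : ((a :: b :: t).length : Int) = ((b :: t).length : Int) + 1 := by simp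
    have hsh : PySem.List.pyRange (1 + 1) ((a :: b :: t).length : Int) 1
        = (PySem.List.pyRange 1 ((b :: t).length : Int) 1).map (· + 1) := by
      rw [hlen, PySem.List.pyRange_one, PySem.List.pyRange_one]
      have : (((b :: t).length : Int) + 1 - (1 + 1)).toNat = (((b :: t).length : Int) - 1).toNat := by omega
      rw [this, List.map_map]
      apply List.map_congr_left
      intro k _
      simp
      ring
    rw [hsh, List.map_map]
    have hfun : ∀ i ∈ PySem.List.pyRange 1 ((b :: t).length : Int) 1,
        ((fun idx => PySem.List.pyGetD (a :: b :: t) idx 0 - PySem.List.pyGetD (a :: b :: t) (idx - 1) 0 - 1) ∘ (· + 1)) i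
        = (fun idx => PySem.List.pyGetD (b :: t) idx 0 - PySem.List.pyGetD (b :: t) (idx - 1) 0 - 1) i := by
      intro i hi
      have hge : 1 ≤ i := (PySem.List.mem_pyRange_one.mp hi).1
      simp only [Function.comp_apply, add_sub_cancel_right]
      have e1 : PySem.List.pyGetD (a :: b :: t) (i + 1) 0 = PySem.List.pyGetD (b :: t) i 0 := by
        rw [PySem.List.pyGetD_of_nonneg _ _ (by omega), PySem.List.pyGetD_of_nonneg _ _ (by omega)]
        have : (i + 1).toNat = i.toNat + 1 := by omega
        rw [this]; rfl
      have e2 : PySem.List.pyGetD (a :: b :: t) i 0 = PySem.List.pyGetD (b :: t) (i - 1) 0 := by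
        rw [PySem.List.pyGetD_of_nonneg _ _ (by omega), PySem.List.pyGetD_of_nonneg _ _ (by omega)]
        have : i.toNat = (i - 1).toNat + 1 := by omega
        rw [this]; rfl
      rw [e1, e2]
    rw [List.map_congr_left hfun, ih, hh]
    simp [diffs]
def gapsFrom (val : Int) : Int → List Int → List Int
  | run, [] => [run]
  | run, x :: t => if x = val then run :: gapsFrom val 0 t else gapsFrom val (run + 1) t

theorem diffs_posL (val : Int) : ∀ (t : List Int) (r : Int),
    diffs ((-1 - r) :: (posL val t ++ [(t.length : Int)])) = gapsFrom val r t
  | [], r => by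
    simp [posL, diffs, gapsFrom]
  | x :: t, r => by
    have hlen : ((x :: t).length : Int) = ((t.length : Int)) + 1 := by simp
    by_cases hx : x = val
    · have ih := diffs_posL val t 0
      simp only [posL, gapsFrom, hx, if_true]
      simp only [List.length_cons, Nat.cast_add, Nat.cast_one]
      rw [List.cons_append, diffs]
      have hmap : (0 : Int) :: ((posL val t).map (· + 1) ++ [(t.length : Int) + 1])
          = ((-1 : Int) :: (posL val t ++ [(t.length : Int)])).map (· + 1) := by
        simp
      rw [hmap, diffs_map_add_one]
      have h1 : ((-1 : Int) :: (posL val t ++ [(t.length : Int)]))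
          = ((-1 - 0 : Int) :: (posL val t ++ [(t.length : Int)])) := by norm_num
      rw [h1, ih]
      norm_num
    · have ih := diffs_posL val t (r + 1)
      simp only [posL, gapsFrom, hx, if_false]
      simp only [List.length_cons, Nat.cast_add, Nat.cast_one]
      have hmap : ((-1 : Int) - r) :: ((posL val t).map (· + 1) ++ [(t.length : Int) + 1])
          = (((-1 : Int) - (r + 1)) :: (posL val t ++ [(t.length : Int)])).map (· + 1) := by
        simp
        ring
      rw [hmap, diffs_map_add_one, ih]
def gGreedy : List Int → Int
  | c :: n :: rest =>
    if c > 0 then 1 + gGreedy (n :: rest)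
    else if n > 0 then 1 + gGreedy ((n - 1) :: rest)
    else gGreedy (n :: rest)
  | _ => 0
termination_by l => l.length

def stepA : List Int × Int → Int → List Int × Int := fun st i =>
  if PySem.List.pyGetD st.1 i 0 > 0 then
    (st.1.set i.toNat (PySem.List.pyGetD st.1 i 0 - 1), st.2 + 1)
  else if PySem.List.pyGetD st.1 (i + 1) 0 > 0 then
    (st.1.set (i + 1).toNat (PySem.List.pyGetD st.1 (i + 1) 0 - 1), st.2 + 1)
  else st

theorem pyGetD_cons_pos (x : Int) (t : List Int) {i : Int} (h : 1 ≤ i) :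
    PySem.List.pyGetD (x :: t) i 0 = PySem.List.pyGetD t (i - 1) 0 := by
  rw [PySem.List.pyGetD_of_nonneg _ _ (by omega), PySem.List.pyGetD_of_nonneg _ _ (by omega)]
  have : i.toNat = (i - 1).toNat + 1 := by omega
  rw [this]; rfl

theorem set_cons_pos (x v : Int) (t : List Int) {i : Int} (h : 1 ≤ i) :
    (x :: t).set i.toNat v = x :: t.set (i - 1).toNat v := by
  have : i.toNat = (i - 1).toNat + 1 := by omega
  rw [this]; rfl

theorem stepA_cons (x : Int) (t : List Int) (r : Int) {i : Int} (h : 1 ≤ i) :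
    stepA (x :: t, r) i = (x :: (stepA (t, r) (i - 1)).1, (stepA (t, r) (i - 1)).2) := by
  unfold stepA
  simp only
  rw [pyGetD_cons_pos x t h, pyGetD_cons_pos x t (by omega : (1:Int) ≤ i + 1)]
  have e : i + 1 - 1 = (i - 1) + 1 := by ring
  rw [e]
  split_ifs with h1 h2
  · simp [set_cons_pos x _ t h]
  · rw [set_cons_pos x _ t (by omega : (1:Int) ≤ i + 1)]
    simp [e]
  · rfl

theorem foldl_stepA_shift : ∀ (is : List Int), (∀ i ∈ is, 1 ≤ i) → ∀ (x : Int) (t : List Int) (r : Int),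
    List.foldl stepA (x :: t, r) is
      = (x :: (List.foldl stepA (t, r) (is.map (· - 1))).1, (List.foldl stepA (t, r) (is.map (· - 1))).2)
  | [], _, x, t, r => by simp
  | i :: is', h, x, t, r => by
    have h1 : (1 : Int) ≤ i := h i (by simp)
    have ih := foldl_stepA_shift is' (fun j hj => h j (by simp [hj]))
    simp only [List.foldl_cons, List.map_cons]
    rw [stepA_cons x t r h1]
    rw [ih x (stepA (t, r) (i - 1)).1 (stepA (t, r) (i - 1)).2]
theorem map_sub_one_pyRange (b : Int) :
    (PySem.List.pyRange 1 b 1).map (· - 1) = PySem.List.pyRange 0 (b - 1) 1 := by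
  rw [PySem.List.pyRange_one, PySem.List.pyRange_one, List.map_map]
  have : (b - 1 : Int) = b - 1 - 0 := by ring
  rw [← this]
  apply List.map_congr_left
  intro k _
  simp [Function.comp]

theorem loopA_eq : ∀ (l : List Int) (r : Int),
    ((PySem.List.pyRange 0 ((l.length : Int) - 1) 1).foldl stepA (l, r)).2 = r + gGreedy l
  | [], r => by
    rw [PySem.List.pyRange_one_eq_nil (by simp)]
    simp [gGreedy]
  | [c], r => by
    rw [PySem.List.pyRange_one_eq_nil (by simp)]
    simp [gGreedy]
  | c :: n :: t, r => by
    have hb : ((0 : Int)) < ((c :: n :: t).length : Int) - 1 := by simp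
    rw [PySem.List.pyRange_one_cons hb]
    simp only [List.foldl_cons, zero_add]
    have hmem : ∀ i ∈ PySem.List.pyRange 1 (((c :: n :: t).length : Int) - 1) 1, (1 : Int) ≤ i :=
      fun i hi => (PySem.List.mem_pyRange_one.mp hi).1
    have hlen1 : (((c :: n :: t).length : Int) - 1) - 1 = ((n :: t).length : Int) - 1 := by simp
    have hlen2 : (((c :: n :: t).length : Int) - 1) - 1 = (((n - 1) :: t).length : Int) - 1 := by simp
    have hget0 : PySem.List.pyGetD (c :: n :: t) 0 0 = c := by norm_num [PySem.List.pyGetD_ofNat']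
    have hget1 : PySem.List.pyGetD (c :: n :: t) (0 + 1) 0 = n := by norm_num [PySem.List.pyGetD_ofNat']
    have hstep : stepA (c :: n :: t, r) 0 =
        if c > 0 then ((c - 1) :: n :: t, r + 1)
        else if n > 0 then (c :: (n - 1) :: t, r + 1)
        else (c :: n :: t, r) := by
      unfold stepA
      simp only [hget0, hget1]
      split_ifs <;> rfl
    rw [hstep]
    by_cases hc : c > 0
    · rw [if_pos hc]
      rw [foldl_stepA_shift _ hmem (c - 1) (n :: t) (r + 1)]
      simp only [map_sub_one_pyRange, hlen1]
      rw [loopA_eq (n :: t) (r + 1)]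
      simp [gGreedy, hc]
      ring
    · rw [if_neg hc]
      by_cases hn : n > 0
      · rw [if_pos hn]
        rw [foldl_stepA_shift _ hmem c ((n - 1) :: t) (r + 1)]
        simp only [map_sub_one_pyRange, hlen2]
        rw [loopA_eq ((n - 1) :: t) (r + 1)]
        simp [gGreedy, hc, hn]
        ring
      · rw [if_neg hn]
        rw [foldl_stepA_shift _ hmem c (n :: t) r]
        simp only [map_sub_one_pyRange, hlen1]
        rw [loopA_eq (n :: t) r]
        simp [gGreedy, hc, hn]
termination_by l _ => l.length
def stepB (val : Int) : Int × Option Int × Int → Int → Int × Option Int × Int := fun st x =>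
  if x = val then
    match st.2.1 with
    | none => (st.1, some st.2.2, 0)
    | some c =>
      if c > 0 then (st.1 + 1, some st.2.2, 0)
      else if st.2.2 > 0 then (st.1 + 1, some (st.2.2 - 1), 0)
      else (st.1, some st.2.2, 0)
  else (st.1, st.2.1, st.2.2 + 1)

def finB : Int × Option Int × Int → Int := fun st =>
  match st.2.1 with
  | some c => if c > 0 ∨ st.2.2 > 0 then st.1 + 1 else st.1
  | none => st.1

theorem gGreedy_pair (c n : Int) : gGreedy [c, n] = if c > 0 ∨ n > 0 then 1 else 0 := by
  by_cases hc : c > 0 <;> by_cases hn : n > 0 <;> simp [gGreedy, hc, hn]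

theorem foldB_some (val : Int) : ∀ (arr : List Int) (ret cur run : Int),
    finB (arr.foldl (stepB val) (ret, some cur, run)) = ret + gGreedy (cur :: gapsFrom val run arr)
  | [], ret, cur, run => by
    simp [finB, gapsFrom, gGreedy_pair]
    by_cases hc : cur > 0 <;> by_cases hr : run > 0 <;> simp [hc, hr]
  | x :: t, ret, cur, run => by
    by_cases hx : x = val
    · simp only [List.foldl_cons, stepB, hx, if_true, gapsFrom]
      by_cases hc : cur > 0
      · rw [if_pos hc]
        rw [foldB_some val t (ret + 1) run 0]
        have : gGreedy (cur :: run :: gapsFrom val 0 t) = 1 + gGreedy (run :: gapsFrom val 0 t) := by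
          cases h : gapsFrom val 0 t <;> simp [gGreedy, hc]
        rw [this]; ring
      · rw [if_neg hc]
        by_cases hr : run > 0
        · rw [if_pos hr]
          rw [foldB_some val t (ret + 1) (run - 1) 0]
          have : gGreedy (cur :: run :: gapsFrom val 0 t) = 1 + gGreedy ((run - 1) :: gapsFrom val 0 t) := by
            cases h : gapsFrom val 0 t <;> simp [gGreedy, hc, hr]
          rw [this]; ring
        · rw [if_neg hr]
          rw [foldB_some val t ret run 0]
          have : gGreedy (cur :: run :: gapsFrom val 0 t) = gGreedy (run :: gapsFrom val 0 t) := by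
            cases h : gapsFrom val 0 t <;> simp [gGreedy, hc, hr]
          rw [this]
    · simp only [List.foldl_cons, stepB, hx, gapsFrom]
      exact foldB_some val t ret cur (run + 1)

theorem foldB_none (val : Int) : ∀ (arr : List Int) (ret run : Int),
    finB (arr.foldl (stepB val) (ret, none, run)) = ret + gGreedy (gapsFrom val run arr)
  | [], ret, run => by simp [finB, gapsFrom, gGreedy]
  | x :: t, ret, run => by
    by_cases hx : x = val
    · simp only [List.foldl_cons, stepB, hx, if_true, gapsFrom]
      rw [foldB_some val t ret run 0]
    · simp only [List.foldl_cons, stepB, hx, gapsFrom]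
      exact foldB_none val t ret (run + 1)
theorem loopA_eq' (l : List Int) (r : Int) :
    ((PySem.List.pyRange 0 ((l.length : Int) - 1) 1).foldl
      (fun (st : List Int × Int) i =>
        if PySem.List.pyGetD st.1 i 0 > 0 then
          (st.1.set i.toNat (PySem.List.pyGetD st.1 i 0 - 1), st.2 + 1)
        else if PySem.List.pyGetD st.1 (i + 1) 0 > 0 then
          (st.1.set (i + 1).toNat (PySem.List.pyGetD st.1 (i + 1) 0 - 1), st.2 + 1)
        else st) (l, r)).2 = r + gGreedy l := loopA_eq l r

theorem check_star_eq_greedy (val : Int) (arr : List Int) :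
    check_star val arr = gGreedy (gapsFrom val 0 arr) := by
  unfold check_star
  dsimp only
  have hl1 : (fun (acc : List Int) (idx : Int) => if PySem.List.pyGetD arr idx 0 = val then acc ++ [idx] else acc)
      = (fun acc idx => if (fun i => decide (PySem.List.pyGetD arr i 0 = val)) idx = true then acc ++ [(fun i : Int => i) idx] else acc) := by
    funext acc idx
    simp
  rw [hl1, PySem.List.foldl_append_if, posL_eq]
  rw [PySem.List.foldl_append_singleton_eq_map, List.nil_append]
  rw [interval_map_eq_diffs]
  rw [loopA_eq']
  have hxs : [(-1 : Int)] ++ List.map (fun i => i) (posL val arr) ++ [(arr.length : Int)]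
      = (-1 - 0 : Int) :: (posL val arr ++ [(arr.length : Int)]) := by
    simp
  rw [hxs, diffs_posL]
  ring
theorem check_star_alt_eq_greedy (val : Int) (arr : List Int) :
    check_star_alt val arr = gGreedy (gapsFrom val 0 arr) := by
  have h : check_star_alt val arr = finB (arr.foldl (stepB val) (0, none, 0)) := rfl
  rw [h, foldB_none]
  ring

-- ===== VERDICT (by name: the statement is the Claim_ definition above) =====
theorem check_star_spec : Claim_equal_check_star := by
  intro val arr _
  unfold Spec_check_star
  rw [check_star_eq_greedy, check_star_alt_eq_greedy]
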